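-- pv_equiv track=rewrite | github.com/superQCman/ORT | concorde/collect_concorde_rows.py | ordered_fieldnames
-- ===== SOURCE A (Python) =====
-- DEFAULT_META_COLUMNS = [
--     "hardware_name",
--     "combo",
--     "op_name",
--     "op_idx",
--     "trace_dir",
--     "view_log",
--     "config_path",
--     "shared_llc",
--     "target_tid",
--     "instruction_count",
--     "window_size",
-- ]
--
-- def ordered_fieldnames(rows: list[dict[str, str]]) -> list[str]:
--     first_row_order = list(rows[0].keys())
--     ordered = [name for name in DEFAULT_META_COLUMNS if name in first_row_order]
--     ordered.extend(name for name in first_row_order if name not in ordered)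
--
--     for row in rows[1:]:
--         for name in row.keys():
--             if name not in ordered:
--                 ordered.append(name)
--     return ordered
-- ===== SOURCE B (Python) =====
-- DEFAULT_META_COLUMNS = [
--     "hardware_name",
--     "combo",
--     "op_name",
--     "op_idx",
--     "trace_dir",
--     "view_log",
--     "config_path",
--     "shared_llc",
--     "target_tid",
--     "instruction_count",
--     "window_size",
-- ]
--
-- def ordered_fieldnames(rows: list[dict[str, str]]) -> list[str]:
--     all_keys = dict.fromkeys(k for row in rows for k in row)
--     first_keys = set(rows[0])
--     priority = [n for n in DEFAULT_META_COLUMNS if n in first_keys]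
--     pset = set(priority)
--     return priority + [k for k in all_keys if k not in pset]
-- ===== Notes on version B (the rewrite author's own statement) =====
-- stated objective: faster
-- what changed: Replaces A's filter/extend plus nested append-if-missing loops (linear list membership per key) by a single flattened dict.fromkeys union of all keys, partitioned against the first-row priority columns via set membership.
-- outside the precondition, e.g. on ordered_fieldnames([]): A raises IndexError, B raises IndexError
import Mathlib
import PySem

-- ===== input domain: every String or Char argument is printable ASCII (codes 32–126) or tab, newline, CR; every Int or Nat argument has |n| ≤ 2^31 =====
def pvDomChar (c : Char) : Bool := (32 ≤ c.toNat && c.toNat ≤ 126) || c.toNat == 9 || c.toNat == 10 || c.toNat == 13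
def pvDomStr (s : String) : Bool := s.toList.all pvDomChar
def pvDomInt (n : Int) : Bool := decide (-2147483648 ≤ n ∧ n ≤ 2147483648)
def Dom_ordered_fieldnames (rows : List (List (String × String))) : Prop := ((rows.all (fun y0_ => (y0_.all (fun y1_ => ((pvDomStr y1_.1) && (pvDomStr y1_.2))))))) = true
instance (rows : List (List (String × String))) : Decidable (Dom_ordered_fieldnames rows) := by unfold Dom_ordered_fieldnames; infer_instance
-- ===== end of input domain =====

-- B replaces A's filter/extend/nested-append loops by one flattened key-union pass that is
-- partitioned against the first-row priority columns (objective: idiomatic; return value only).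

-- ===== PORT A =====
def DEFAULT_META_COLUMNS : List String :=
  ["hardware_name", "combo", "op_name", "op_idx", "trace_dir", "view_log",
   "config_path", "shared_llc", "target_tid", "instruction_count", "window_size"]

-- A dict's keys, given the association-list representation of the dict: first
-- occurrences of the key column, in insertion order (exact for Python dict iteration).
def pyDictKeys (row : List (String × String)) : List String :=
  PySem.List.dedup (row.map Prod.fst)

def ordered_fieldnames (rows : List (List (String × String))) : List String :=
  -- rows[0] raises IndexError on empty rows; Pre_ excludes that, the default [] is unclaimed
  let first_row_order := pyDictKeys (PySem.List.pyGetD rows 0 [])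
  let ordered := DEFAULT_META_COLUMNS.filter (fun name => first_row_order.contains name)
  let ordered := first_row_order.foldl
    (fun acc name => if acc.contains name then acc else acc ++ [name]) ordered
  (PySem.List.slice rows (some 1) none).foldl
    (fun acc row => (pyDictKeys row).foldl
      (fun acc name => if acc.contains name then acc else acc ++ [name]) acc) ordered

-- ===== PORT B =====
def ordered_fieldnames_alt (rows : List (List (String × String))) : List String :=
  let all_keys := PySem.List.dedup (rows.flatMap (fun row => pyDictKeys row))
  let first_keys := PySem.Set.ofList (pyDictKeys (PySem.List.pyGetD rows 0 []))
  let priority := DEFAULT_META_COLUMNS.filter (fun n => first_keys.contains n)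
  let pset := PySem.Set.ofList priority
  priority ++ all_keys.filter (fun k => !pset.contains k)

-- ===== PRECONDITION & SPEC =====
-- Pre_ excludes only the empty list, on which Python A (and B) raise IndexError at rows[0].
def Pre_ordered_fieldnames (rows : List (List (String × String))) : Prop := rows ≠ []
instance (rows : List (List (String × String))) : Decidable (Pre_ordered_fieldnames rows) := by
  unfold Pre_ordered_fieldnames; infer_instance

def pvWitness_ordered_fieldnames : (List (List (String × String))) := [[("op_name", "add"), ("extra", "1")]]

def Spec_ordered_fieldnames (rows : List (List (String × String))) (out : List String) : Prop := out = ordered_fieldnames_alt rows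
instance (rows : List (List (String × String))) (out : List String) : Decidable (Spec_ordered_fieldnames rows out) := by unfold Spec_ordered_fieldnames; infer_instance

-- ===== CLAIM (what is proved, stated in full; the proofs are below) =====
def Claim_equal_ordered_fieldnames : Prop := ∀ (rows : List (List (String × String))), Dom_ordered_fieldnames rows → Pre_ordered_fieldnames rows → Spec_ordered_fieldnames rows (ordered_fieldnames rows)

-- ===== LEMMAS AND PROOFS =====

-- A's "append if missing" loop body, as a function of the accumulator and the scanned list.
def appendNew (acc l : List String) : List String :=
  l.foldl (fun acc name => if acc.contains name then acc else acc ++ [name]) acc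

theorem appendNew_nil_eq_ofList (l : List String) : appendNew [] l = PySem.Set.ofList l := by
  rw [PySem.Set.ofList_eq_foldl]; rfl

theorem appendNew_append (acc l₁ l₂ : List String) :
    appendNew acc (l₁ ++ l₂) = appendNew (appendNew acc l₁) l₂ := by
  simp [appendNew, List.foldl_append]

theorem appendNew_cons (acc : List String) (x : String) (l : List String) :
    appendNew acc (x :: l) = appendNew (if acc.contains x then acc else acc ++ [x]) l := rfl

-- the key characterisation: scanning l appends exactly the deduped l minus acc, in order
theorem appendNew_eq (l acc : List String) :
    appendNew acc l = acc ++ (appendNew [] l).filter (fun n => !acc.contains n) := by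
  induction l generalizing acc with
  | nil => simp [appendNew]
  | cons x l ih =>
    have h0 : appendNew [] (x :: l) = appendNew [x] l := rfl
    rw [appendNew_cons acc, h0, ih [x]]
    cases hmem : acc.contains x with
    | true =>
      rw [if_pos rfl, ih acc, List.filter_append]
      have hx : x ∈ acc := List.contains_iff_mem.mp hmem
      have h1 : List.filter (fun n => !acc.contains n) [x] = [] := by
        simp [hx]
      rw [h1, List.nil_append, List.filter_filter]
      congr 1
      apply List.filter_congr
      intro n _
      cases h : acc.contains n with
      | true => simp [h]
      | false =>
        have hne : ¬ n = x := by
          intro he; rw [he] at h; rw [h] at hmem; cases hmem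
        simp [h, hne]
    | false =>
      rw [if_neg (by simp), ih (acc ++ [x]), List.append_assoc, List.filter_append]
      have hx : x ∉ acc := by
        intro hc
        rw [List.contains_iff_mem.mpr hc] at hmem
        cases hmem
      have h1 : List.filter (fun n => !acc.contains n) [x] = [x] := by
        simp [hx]
      rw [h1, List.filter_filter]
      congr 2
      apply List.filter_congr
      intro n _
      simp only [List.contains_append]
      cases h : acc.contains n <;> cases hq : List.contains [x] n <;> simp [h, hq]

-- the outer row loop is appendNew over the flattened keys
theorem foldl_rows_eq_appendNew (rs : List (List (String × String))) (acc : List String) :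
    rs.foldl (fun acc row => appendNew acc (pyDictKeys row)) acc
      = appendNew acc (rs.flatMap (fun row => pyDictKeys row)) := by
  induction rs generalizing acc with
  | nil => simp [appendNew]
  | cons r rs ih => rw [List.foldl_cons, ih, List.flatMap_cons, appendNew_append]

theorem contains_ofList (xs : List String) (x : String) :
    (PySem.Set.ofList xs).contains x = xs.contains x := by
  rw [Bool.eq_iff_iff]
  show List.contains _ _ = true ↔ _
  rw [List.contains_iff_mem, List.contains_iff_mem]
  exact PySem.Set.mem_ofList xs x

-- ===== VERDICT (by name: the statement is the Claim_ definition above) =====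
theorem ordered_fieldnames_spec : Claim_equal_ordered_fieldnames := by
  intro rows _ hpre
  unfold Spec_ordered_fieldnames ordered_fieldnames ordered_fieldnames_alt
  obtain ⟨r, rs, rfl⟩ : ∃ r rs, rows = r :: rs := by
    cases rows with
    | nil => exact absurd rfl hpre
    | cons r rs => exact ⟨r, rs, rfl⟩
  simp only []
  have hslice : PySem.List.slice (r :: rs) (some 1) none = rs := by
    simpa using PySem.List.slice_from_natCast (xs := r :: rs) (a := 1)
  rw [hslice]
  have hget : PySem.List.pyGetD (r :: rs) 0 [] = r := by
    simpa using PySem.List.pyGetD_natCast (xs := r :: rs) (n := 0) (d := [])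
  rw [hget]
  -- abbreviations
  set K0 := pyDictKeys r with hK0
  set P := DEFAULT_META_COLUMNS.filter (fun name => K0.contains name) with hP
  -- A side
  have hA :
      rs.foldl (fun acc row => appendNew acc (pyDictKeys row)) (appendNew P K0)
        = appendNew P (K0 ++ rs.flatMap (fun row => pyDictKeys row)) := by
    rw [foldl_rows_eq_appendNew, appendNew_append]
  show rs.foldl (fun acc row => appendNew acc (pyDictKeys row)) (appendNew P K0) = _
  rw [hA, appendNew_eq]
  -- B side: all_keys = appendNew [] of the same flattened list
  have hall : PySem.List.dedup ((r :: rs).flatMap (fun row => pyDictKeys row))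
      = appendNew [] (K0 ++ rs.flatMap (fun row => pyDictKeys row)) := by
    rw [PySem.List.dedup_eq_ofList, ← appendNew_nil_eq_ofList, List.flatMap_cons]
  rw [hall]
  -- priority lists coincide
  have hprio : DEFAULT_META_COLUMNS.filter (fun n => (PySem.Set.ofList K0).contains n) = P := by
    rw [hP]
    apply List.filter_congr
    intro n _
    rw [contains_ofList]
  rw [hprio]
  -- pset membership test = P membership test
  congr 1
  apply List.filter_congr
  intro k _
  rw [contains_ofList]
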